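-- pv_equiv track=rewrite | github.com/jaguaryehia/VCF-files-analysis | project8.py | MedianStringSearch
-- ===== SOURCE A (Python) =====
-- import itertools
--
-- def TotalDistance(pattern, DNA):
--     distance = 0
--     for dna in DNA:
--         hamming = len(dna)
--         for i in range(len(dna)-len(pattern)+1):
--             subseq = dna[i:i+len(pattern)]
--             hamming_temp = sum(1 for a, b in zip(subseq, pattern) if a != b)
--             if hamming_temp < hamming:
--                 hamming = hamming_temp
--         distance += hamming
--     return distance
--
-- def combination_generator(possibilities, strlen):
--     yield from itertools.product(*([possibilities] * strlen))
--
-- def MedianStringSearch(DNA, L):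
--     bestWord = 'A'*L
--     bestDistance = float('inf')
--     for i in combination_generator('ACGT', L):
--         pattern = ''.join(i)
--         distance = TotalDistance(pattern, DNA)
--         if distance < bestDistance:
--             bestDistance = distance
--             bestWord = pattern
--     return bestWord
-- ===== SOURCE B (Python) =====
-- def MedianStringSearch(DNA, L):
--     k = L if L > 0 else 0
--
--     def partial(prefix):
--         # lower bound on TotalDistance of any length-k extension of prefix
--         # (equals the exact total distance when len(prefix) == k)
--         total = 0
--         for dna in DNA:
--             m = len(dna)
--             h = m
--             for i in range(m - k + 1):
--                 t = sum(1 for a, b in zip(dna[i:i + len(prefix)], prefix) if a != b)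
--                 if t < h:
--                     h = t
--             total += h
--         return total
--
--     def dfs(rem, prefix, best):
--         d = partial(prefix)
--         if best[1] is not None and best[1] <= d:
--             return best  # prune: no extension can strictly beat the current best
--         if rem == 0:
--             return (prefix, d)
--         for c in 'ACGT':
--             best = dfs(rem - 1, prefix + c, best)
--         return best
--
--     return dfs(k, '', ('', None))[0]
-- ===== Notes on version B (the rewrite author's own statement) =====
-- stated objective: alternative
-- what changed: A exhaustively scores all 4^L candidate L-mers; B does a lexicographic branch-and-bound DFS over prefixes, pruning a whole subtree whenever the partial min-Hamming lower bound of the prefix already reaches the current best, returning the identical first minimizer.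
import Mathlib
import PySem

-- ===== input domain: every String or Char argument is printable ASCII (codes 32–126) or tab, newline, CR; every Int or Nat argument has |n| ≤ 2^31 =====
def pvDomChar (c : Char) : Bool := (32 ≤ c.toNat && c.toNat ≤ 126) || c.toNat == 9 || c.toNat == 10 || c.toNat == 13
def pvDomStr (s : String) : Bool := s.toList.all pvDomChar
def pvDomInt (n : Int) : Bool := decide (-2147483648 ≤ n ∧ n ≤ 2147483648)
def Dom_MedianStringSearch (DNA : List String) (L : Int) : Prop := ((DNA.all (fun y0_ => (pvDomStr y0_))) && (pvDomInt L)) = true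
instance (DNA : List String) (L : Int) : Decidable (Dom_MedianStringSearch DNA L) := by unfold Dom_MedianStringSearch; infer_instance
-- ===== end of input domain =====

-- B replaces A's exhaustive enumeration of all 4^L patterns by a lexicographic
-- branch-and-bound DFS over prefixes, pruning by a partial-distance lower bound
-- (same result, same worst-case cost; a genuinely different search strategy).


-- ===== PORT A =====
-- sum(1 for a, b in zip(subseq, pattern) if a != b)  (zip truncates to the shorter list)
def pvZipMism : List Char → List Char → Nat
  | a :: xs, b :: ys => (if a = b then 0 else 1) + pvZipMism xs ys
  | _, _ => 0

-- inner loop of TotalDistance for one string dna: hamming = len(dna); for i in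
-- range(len(dna)-len(pattern)+1): …  (the Nat expression len+1-plen is exactly
-- Python's max(0, len-plen+1) range length; the slice dna[i:i+len(pattern)] is
-- (drop i).take plen, exact since 0 ≤ i ≤ len-plen)
def pvMinWin (s : List Char) (pattern : List Char) : Nat :=
  (List.range (s.length + 1 - pattern.length)).foldl
    (fun h i =>
      let t := pvZipMism ((s.drop i).take pattern.length) pattern
      if t < h then t else h)
    s.length

def pvTotalDistance (pattern : List Char) (DNA : List String) : Nat :=
  DNA.foldl (fun d dna => d + pvMinWin dna.toList pattern) 0

-- itertools.product('ACGT', repeat=L): last coordinate varies fastest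
def pvPatterns : Nat → List (List Char)
  | 0 => [[]]
  | n + 1 => "ACGT".toList.flatMap (fun c => (pvPatterns n).map (fun r => c :: r))

-- loop body: distance = TotalDistance(...); if distance < bestDistance: update
-- (bestDistance = float('inf') is the `none` state; any int is < inf)
def pvStep (DNA : List String) (best : List Char × Option Nat) (p : List Char) :
    List Char × Option Nat :=
  let d := pvTotalDistance p DNA
  match best.2 with
  | none => (p, some d)
  | some b => if d < b then (p, some d) else best

def MedianStringSearch (DNA : List String) (L : Int) : String :=
  -- bestWord = 'A'*L ('' for L ≤ 0, matching L.toNat)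
  String.mk ((pvPatterns L.toNat).foldl (pvStep DNA) (List.replicate L.toNat 'A', none)).1

-- ===== PORT B =====
-- one dna's contribution to partial(prefix): min over the length-k window
-- starts of the mismatch count of prefix vs the window's prefix
def pvBound (k : Nat) (pfx : List Char) (dna : String) : Nat :=
  let s := dna.toList
  (List.range (s.length + 1 - k)).foldl
    (fun h i =>
      let t := pvZipMism ((s.drop i).take pfx.length) pfx
      if t < h then t else h)
    s.length

-- partial(prefix): lower bound on the total distance of any length-k extension
-- of prefix; exact total distance when len(prefix) = k
def pvPartial (DNA : List String) (k : Nat) (pfx : List Char) : Nat :=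
  DNA.foldl (fun total dna => total + pvBound k pfx dna) 0

-- dfs(rem, prefix, best): prune when the current best is ≤ the lower bound
def pvDfs (DNA : List String) (k : Nat) : Nat → List Char → List Char × Option Nat →
    List Char × Option Nat
  | rem, pfx, best =>
    let d := pvPartial DNA k pfx
    let prune := match best.2 with | some b => decide (b ≤ d) | none => false
    if prune then best
    else
      match rem with
      | 0 => (pfx, some d)
      | rem + 1 => "ACGT".toList.foldl (fun acc c => pvDfs DNA k rem (pfx ++ [c]) acc) best

def MedianStringSearch_alt (DNA : List String) (L : Int) : String :=
  String.mk (pvDfs DNA L.toNat L.toNat [] ([], none)).1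

-- ===== PRECONDITION & SPEC =====
def Spec_MedianStringSearch (DNA : List String) (L : Int) (out : String) : Prop := out = MedianStringSearch_alt DNA L
instance (DNA : List String) (L : Int) (out : String) : Decidable (Spec_MedianStringSearch DNA L out) := by unfold Spec_MedianStringSearch; infer_instance

-- ===== CLAIM (what is proved, stated in full; the proofs are below) =====
def Claim_equal_MedianStringSearch : Prop := ∀ (DNA : List String) (L : Int), Dom_MedianStringSearch DNA L → Spec_MedianStringSearch DNA L (MedianStringSearch DNA L)

-- ===== LEMMAS AND PROOFS =====

-- the leaves of the DFS subtree rooted at prefix p with rem = k, in DFS order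
def pvExt (p : List Char) : Nat → List (List Char)
  | 0 => [p]
  | k + 1 => "ACGT".toList.flatMap (fun c => pvExt (p ++ [c]) k)

theorem pvExt_eq (k : Nat) : ∀ p, pvExt p k = (pvPatterns k).map (fun r => p ++ r) := by
  induction k with
  | zero => intro p; simp [pvExt, pvPatterns]
  | succ k ih =>
    intro p
    simp only [pvExt, pvPatterns, List.map_flatMap]
    congr 1
    funext c
    rw [ih (p ++ [c])]
    simp [List.map_map, Function.comp_def]

theorem pvPatterns_length {k : Nat} {q : List Char} (h : q ∈ pvPatterns k) : q.length = k := by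
  induction k generalizing q with
  | zero => simp [pvPatterns] at h; simp [h]
  | succ k ih =>
    simp only [pvPatterns, List.mem_flatMap, List.mem_map] at h
    obtain ⟨c, _, r, hr, rfl⟩ := h
    simp [ih hr]

theorem pvPatterns_ne_nil (k : Nat) : pvPatterns k ≠ [] := by
  induction k with
  | zero => simp [pvPatterns]
  | succ k ih =>
    cases hp : pvPatterns k with
    | nil => exact absurd hp ih
    | cons q t => simp [pvPatterns, hp]

-- mismatches of a prefix against the window's prefix never exceed the full count
theorem pvZipMism_prefix_le : ∀ (p r xs : List Char),
    pvZipMism (xs.take p.length) p ≤ pvZipMism xs (p ++ r) := by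
  intro p
  induction p with
  | nil => intro r xs; simp [pvZipMism]
  | cons a p ih =>
    intro r xs
    cases xs with
    | nil => simp [pvZipMism]
    | cons x xs =>
      simp only [List.length_cons, List.take_succ_cons, List.cons_append, pvZipMism]
      exact Nat.add_le_add_left (ih r xs) _

-- fold-min monotonicity over the same index list
theorem foldl_min_mono {f g : Nat → Nat} (hfg : ∀ i, f i ≤ g i) :
    ∀ (l : List Nat) (h1 h2 : Nat), h1 ≤ h2 →
    l.foldl (fun h i => if f i < h then f i else h) h1 ≤
    l.foldl (fun h i => if g i < h then g i else h) h2 := by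
  intro l
  induction l with
  | nil => intro h1 h2 h; simpa using h
  | cons i l ih =>
    intro h1 h2 h
    simp only [List.foldl_cons]
    apply ih
    have := hfg i
    split <;> split <;> omega

theorem pvBound_mono (k : Nat) (p r : List Char) (dna : String) :
    pvBound k p dna ≤ pvBound k (p ++ r) dna := by
  unfold pvBound
  apply foldl_min_mono _ _ _ _ (Nat.le_refl _)
  intro i
  rw [List.length_append]
  have h := pvZipMism_prefix_le p r ((dna.toList.drop i).take (p.length + r.length))
  rwa [List.take_take, Nat.min_def, if_pos (Nat.le_add_right _ _)] at h

theorem foldl_add_mono {f g : String → Nat} (hfg : ∀ d, f d ≤ g d) :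
    ∀ (l : List String) (a b : Nat), a ≤ b →
    l.foldl (fun t d => t + f d) a ≤ l.foldl (fun t d => t + g d) b := by
  intro l
  induction l with
  | nil => intro a b h; simpa using h
  | cons d l ih =>
    intro a b h
    simp only [List.foldl_cons]
    exact ih _ _ (Nat.add_le_add h (hfg d))

theorem pvPartial_mono (DNA : List String) (k : Nat) (p r : List Char) :
    pvPartial DNA k p ≤ pvPartial DNA k (p ++ r) := by
  unfold pvPartial
  exact foldl_add_mono (fun dna => pvBound_mono k p r dna) DNA 0 0 (Nat.le_refl 0)

-- at a leaf (full length) the lower bound is the exact total distance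
theorem pvPartial_eq_total (DNA : List String) (p : List Char) :
    pvPartial DNA p.length p = pvTotalDistance p DNA := rfl

theorem total_ge_partial (DNA : List String) (k : Nat) (p r : List Char)
    (hlen : (p ++ r).length = k) :
    pvPartial DNA k p ≤ pvTotalDistance (p ++ r) DNA := by
  have h := pvPartial_mono DNA k p r
  rw [← hlen] at h ⊢
  rwa [pvPartial_eq_total] at h

-- folding A's update over patterns none of which strictly beats b is a no-op
theorem foldl_step_noop (DNA : List String) (w : List Char) (b : Nat) :
    ∀ (l : List (List Char)), (∀ q ∈ l, b ≤ pvTotalDistance q DNA) →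
    l.foldl (pvStep DNA) (w, some b) = (w, some b) := by
  intro l
  induction l with
  | nil => intro _; rfl
  | cons q l ih =>
    intro h
    have hq := h q (by simp)
    simp only [List.foldl_cons, pvStep, if_neg (by omega : ¬ pvTotalDistance q DNA < b)]
    exact ih fun q hq => h q (by simp [hq])

-- MAIN INVARIANT: the pruned DFS computes exactly A's fold over the subtree's leaves
theorem pvDfs_eq_foldl (DNA : List String) (k : Nat) :
    ∀ (rem : Nat) (p : List Char) (best : List Char × Option Nat),
    p.length + rem = k →
    pvDfs DNA k rem p best = (pvExt p rem).foldl (pvStep DNA) best := by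
  intro rem
  induction rem with
  | zero =>
    intro p best hlen
    obtain ⟨w, ob⟩ := best
    have hlen' : p.length = k := by omega
    have hp : pvPartial DNA k p = pvTotalDistance p DNA := by
      rw [← hlen']; exact pvPartial_eq_total DNA p
    rw [pvDfs]
    simp only [pvExt, List.foldl_cons, List.foldl_nil, pvStep, hp]
    cases ob with
    | none => simp
    | some b =>
      by_cases hb : b ≤ pvTotalDistance p DNA
      · simp [hb, if_neg (by omega : ¬ pvTotalDistance p DNA < b)]
      · simp [hb, if_pos (by omega : pvTotalDistance p DNA < b)]
  | succ rem ih =>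
    intro p best hlen
    obtain ⟨w, ob⟩ := best
    rw [pvDfs]
    have hleaf : ∀ q ∈ pvExt p (rem + 1), pvPartial DNA k p ≤ pvTotalDistance q DNA := by
      intro q hq
      rw [pvExt_eq] at hq
      obtain ⟨r, hr, rfl⟩ := List.mem_map.mp hq
      exact total_ge_partial DNA k p r (by simp [pvPatterns_length hr]; omega)
    have hfun : (fun (acc : List Char × Option Nat) c => pvDfs DNA k rem (p ++ [c]) acc) =
        (fun acc c => (pvExt (p ++ [c]) rem).foldl (pvStep DNA) acc) := by
      funext acc c
      exact ih (p ++ [c]) acc (by simp; omega)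
    have hrec : ∀ (acc : List Char × Option Nat),
        "ACGT".toList.foldl (fun acc c => pvDfs DNA k rem (p ++ [c]) acc) acc =
        (pvExt p (rem + 1)).foldl (pvStep DNA) acc := by
      intro acc
      show _ = ("ACGT".toList.flatMap (fun c => pvExt (p ++ [c]) rem)).foldl _ _
      rw [List.foldl_flatMap, hfun]
    cases ob with
    | none => simpa using hrec (w, none)
    | some b =>
      by_cases hb : b ≤ pvPartial DNA k p
      · simp only [hb, decide_true, if_true]
        exact (foldl_step_noop DNA w b _ fun q hq => le_trans hb (hleaf q hq)).symm
      · simp only [hb, decide_false]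
        simpa using hrec (w, some b)

-- with an empty best, the initial word is overwritten at the first pattern
theorem foldl_step_init (DNA : List String) (w w' : List Char) :
    ∀ (l : List (List Char)), l ≠ [] →
    l.foldl (pvStep DNA) (w, none) = l.foldl (pvStep DNA) (w', none) := by
  intro l hl
  cases l with
  | nil => exact absurd rfl hl
  | cons q l => simp [List.foldl_cons, pvStep]

-- ===== VERDICT (by name: the statement is the Claim_ definition above) =====
theorem MedianStringSearch_spec : Claim_equal_MedianStringSearch := by
  intro DNA L _
  unfold Spec_MedianStringSearch MedianStringSearch MedianStringSearch_alt
  rw [pvDfs_eq_foldl DNA L.toNat L.toNat [] ([], none) (by simp)]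
  rw [pvExt_eq]
  simp only [List.nil_append, List.map_id']
  rw [foldl_step_init DNA (List.replicate L.toNat 'A') [] _ (pvPatterns_ne_nil L.toNat)]
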